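-- pv_equiv track=rewrite | github.com/qn06142/coding-python | c11pnum.py | find_largest_product
-- ===== SOURCE A (Python) =====
-- def find_largest_product(N, K, primes):
--     max_product = -1
--     for i in range(len(primes) - K + 1):
--         product = 1
--         for j in range(K):
--             product *= primes[i + j]
--         if product <= N:
--             max_product = max(max_product, product)
--         else:
--             break
--     return max_product
-- ===== SOURCE B (Python) =====
-- def find_largest_product(N, K, primes):
--     n = len(primes)
--     if K <= 0:
--         # every window is empty, so every window product is the empty product 1
--         return 1 if 1 <= N else -1
--     if n < K:
--         return -1
--     # sliding window: p = product of the non-zero elements in the window,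
--     # z = number of zeros in the window; the window product is 0 if z > 0 else p
--     p = 1
--     z = 0
--     for x in primes[0:K]:
--         if x == 0:
--             z += 1
--         else:
--             p *= x
--     best = -1
--     i = 0
--     while True:
--         cur = 0 if z > 0 else p
--         if cur <= N:
--             if best < cur:
--                 best = cur
--         else:
--             return best
--         if i + K >= n:
--             return best
--         out = primes[i]
--         if out == 0:
--             z -= 1
--         else:
--             p //= out
--         inc = primes[i + K]
--         if inc == 0:
--             z += 1
--         else:
--             p *= inc
--         i += 1
-- ===== Notes on version B (the rewrite author's own statement) =====
-- stated objective: alternative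
-- what changed: A recomputes each K-element window product from scratch; B maintains one sliding window, dividing out the leaving element and multiplying in the entering one, with zeros tracked by a separate counter (fewer multiplications, but big-integer cost dominates so no measured speed-up).
import Mathlib
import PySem

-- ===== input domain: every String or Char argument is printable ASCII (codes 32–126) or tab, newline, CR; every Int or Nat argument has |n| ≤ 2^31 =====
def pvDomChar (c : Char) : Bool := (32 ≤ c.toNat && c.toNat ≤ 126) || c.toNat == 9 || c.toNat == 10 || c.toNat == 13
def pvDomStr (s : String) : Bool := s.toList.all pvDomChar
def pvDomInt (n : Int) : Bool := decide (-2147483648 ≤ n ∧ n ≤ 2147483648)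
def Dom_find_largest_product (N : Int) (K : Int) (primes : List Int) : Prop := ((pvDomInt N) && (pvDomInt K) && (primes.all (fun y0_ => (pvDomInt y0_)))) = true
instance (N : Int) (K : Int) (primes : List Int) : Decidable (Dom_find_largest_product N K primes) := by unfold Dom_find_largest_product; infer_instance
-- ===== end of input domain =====

-- B computes the window products incrementally with a sliding window (divide out the
-- leaving element, multiply in the entering one, zeros counted separately) instead of
-- A's per-window recomputation.

-- ===== PORT A =====
-- inner loop 'for j in range(K): product *= primes[i+j]' (every reachable index is in
-- range, so the .getD 0 default of pyGet? is never used)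
def pvAProduct (primes : List Int) (K i : Int) : Int :=
  (PySem.List.pyRange 0 K 1).foldl
    (fun product j => product * ((PySem.List.pyGet? primes (i + j)).getD 0)) 1

-- outer loop with early 'break'
def pvAGo (N K : Int) (primes : List Int) : List Int → Int → Int
  | [], maxp => maxp
  | i :: rest, maxp =>
    let product := pvAProduct primes K i
    if product ≤ N then pvAGo N K primes rest (max maxp product) else maxp

def find_largest_product (N : Int) (K : Int) (primes : List Int) : Int :=
  pvAGo N K primes (PySem.List.pyRange 0 ((primes.length : Int) - K + 1) 1) (-1)

-- ===== PORT B =====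
-- 'for x in primes[0:K]: …' building (p, z) = (product of non-zero window elements, zero count)
def pvBInit (w : List Int) : Int × Int :=
  w.foldl (fun pz x => if x = 0 then (pz.1, pz.2 + 1) else (pz.1 * x, pz.2)) (1, 0)

-- the 'while True' loop; fuel = n - K - i counts the windows still ahead
-- (fuel = 0 is exactly Python's 'i + K >= n' exit)
def pvBGo (N K : Int) (primes : List Int) : Nat → Nat → Int → Int → Int → Int
  | 0, _i, p, z, best =>
    let cur : Int := if 0 < z then 0 else p
    if cur ≤ N then (if best < cur then cur else best) else best
  | fuel + 1, i, p, z, best =>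
    let cur : Int := if 0 < z then 0 else p
    if cur ≤ N then
      let outv := primes.getD i 0
      let p1 := if outv = 0 then p else PySem.Int.floordiv p outv
      let z1 := if outv = 0 then z - 1 else z
      let inc := primes.getD (i + K.toNat) 0
      let p2 := if inc = 0 then p1 else p1 * inc
      let z2 := if inc = 0 then z1 + 1 else z1
      pvBGo N K primes fuel (i + 1) p2 z2 (if best < cur then cur else best)
    else best

def find_largest_product_alt (N : Int) (K : Int) (primes : List Int) : Int :=
  if K ≤ 0 then (if (1 : Int) ≤ N then 1 else -1)
  else if (primes.length : Int) < K then -1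
  else
    let pz := pvBInit (primes.take K.toNat)
    pvBGo N K primes (primes.length - K.toNat) 0 pz.1 pz.2 (-1)

-- ===== PRECONDITION & SPEC =====
def Spec_find_largest_product (N : Int) (K : Int) (primes : List Int) (out : Int) : Prop := out = find_largest_product_alt N K primes
instance (N : Int) (K : Int) (primes : List Int) (out : Int) : Decidable (Spec_find_largest_product N K primes out) := by unfold Spec_find_largest_product; infer_instance

-- ===== CLAIM (what is proved, stated in full; the proofs are below) =====
def Claim_equal_find_largest_product : Prop := ∀ (N : Int) (K : Int) (primes : List Int), Dom_find_largest_product N K primes → Spec_find_largest_product N K primes (find_largest_product N K primes)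

-- ===== LEMMAS AND PROOFS =====

-- f maps a zero window element to the neutral 1; mp/cz are the sliding-window invariants
def pvF (x : Int) : Int := if x = 0 then 1 else x
def pvMp (l : List Int) : Int := (l.map pvF).prod
def pvCz (l : List Int) : Nat := l.count 0
def pvWin (primes : List Int) (k i : Nat) : List Int := (primes.drop i).take k

lemma pvBInit_spec (l : List Int) : ∀ p z : Int,
    l.foldl (fun pz x => if x = 0 then (pz.1, pz.2 + 1) else (pz.1 * x, pz.2)) (p, z)
      = (p * pvMp l, z + (pvCz l : Int)) := by
  induction l with
  | nil => intro p z; simp [pvMp, pvCz]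
  | cons a l ih =>
    intro p z
    by_cases ha : a = 0
    · simp [List.foldl_cons, ha, ih, pvMp, pvCz, pvF]
      omega
    · simp [List.foldl_cons, ha, ih, pvMp, pvCz, pvF, mul_assoc]

lemma pvMp_eq_prod {l : List Int} (h : pvCz l = 0) : pvMp l = l.prod := by
  induction l with
  | nil => simp [pvMp]
  | cons a l ih =>
    simp [pvCz, List.count_cons] at h
    simp only [pvMp, List.map_cons, List.prod_cons, pvF, if_neg h.2]
    rw [← pvMp]
    rw [ih (by simp [pvCz, h.1])]

lemma pvProd_eq_zero {l : List Int} (h : 0 < pvCz l) : l.prod = 0 := by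
  apply List.prod_eq_zero
  exact List.count_pos_iff.mp h

-- the window product A's inner loop computes
lemma pvAProduct_eq (primes : List Int) (k i : Nat) (h : i + k ≤ primes.length) :
    pvAProduct primes (k : Int) (i : Int) = (pvWin primes k i).prod := by
  unfold pvAProduct pvWin
  rw [PySem.List.pyRange_zero_natCast, List.foldl_map]
  induction k with
  | zero => simp
  | succ k ih =>
    have hk : i + k ≤ primes.length := by omega
    rw [List.range_succ, List.foldl_append, ih hk]
    have hidx : (i : Int) + (k : Int) = ((i + k : Nat) : Int) := by push_cast; ring
    have hget : PySem.List.pyGet? primes ((i : Int) + (k : Int)) = some primes[i + k] := by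
      rw [hidx]
      exact PySem.List.pyGet?_eq_some_getElem primes (by positivity) (by exact_mod_cast h)
    rw [List.take_add_one]
    simp [hget, List.getElem?_eq_getElem (show i + k < primes.length by omega)]
    exact Or.inl rfl

-- window slides: head falls off, primes[i+k] comes in
lemma pvWin_cons (primes : List Int) (k i : Nat) (hk : 0 < k) (h : i + k ≤ primes.length) :
    pvWin primes k i = primes.getD i 0 :: (primes.drop (i + 1)).take (k - 1) := by
  unfold pvWin
  have hi : i < primes.length := by omega
  rw [List.drop_eq_getElem_cons hi]
  obtain ⟨k', rfl⟩ : ∃ k', k = k' + 1 := ⟨k - 1, by omega⟩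
  rw [List.take_succ_cons]
  simp [List.getD_eq_getElem?_getD, hi]

lemma pvWin_snoc (primes : List Int) (k i : Nat) (hk : 0 < k) (h : i + k < primes.length) :
    pvWin primes k (i + 1) = (primes.drop (i + 1)).take (k - 1) ++ [primes.getD (i + k) 0] := by
  unfold pvWin
  obtain ⟨k', rfl⟩ : ∃ k', k = k' + 1 := ⟨k - 1, by omega⟩
  rw [List.take_add_one]
  have hlen : k' < (primes.drop (i + 1)).length := by simp; omega
  simp [List.getElem?_eq_getElem hlen, List.getD_eq_getElem?_getD,
    List.getElem?_eq_getElem (show i + (k' + 1) < primes.length by omega)]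
  congr 1
  omega

lemma pvBGo_eq (N K : Int) (primes : List Int) (hK : 0 < K) :
    ∀ (fuel i : Nat) (best : Int), i + K.toNat + fuel = primes.length →
      pvBGo N K primes fuel i (pvMp (pvWin primes K.toNat i)) ((pvCz (pvWin primes K.toNat i) : Int)) best
        = pvAGo N K primes ((List.range' i (fuel + 1)).map (fun n : Nat => (n : Int))) best := by
  have hk : 0 < K.toNat := by omega
  have hKk : K = (K.toNat : Int) := (Int.toNat_of_nonneg hK.le).symm
  have hcur : ∀ w : List Int,
      (if (0 : Int) < (pvCz w : Int) then (0 : Int) else pvMp w) = w.prod := by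
    intro w
    by_cases hz : 0 < pvCz w
    · rw [if_pos (by exact_mod_cast hz), pvProd_eq_zero hz]
    · have h0 : pvCz w = 0 := by omega
      rw [if_neg (by omega), pvMp_eq_prod h0]
  intro fuel
  induction fuel with
  | zero =>
    intro i best h
    have hPA : pvAProduct primes K (i : Int) = (pvWin primes K.toNat i).prod := by
      rw [hKk]; exact pvAProduct_eq primes K.toNat i (by omega)
    have hl : (List.range' i (0 + 1)).map (fun n : Nat => (n : Int)) = [(i : Int)] := by simp
    rw [hl]
    simp only [pvBGo, pvAGo, hcur, hPA]
    split
    · split <;> omega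
    · rfl
  | succ fuel ih =>
    intro i best h
    have hlt : i + K.toNat < primes.length := by omega
    have hwc := pvWin_cons primes K.toNat i hk (by omega)
    have hws := pvWin_snoc primes K.toNat i hk hlt
    have hPA : pvAProduct primes K (i : Int) = (pvWin primes K.toNat i).prod := by
      rw [hKk]; exact pvAProduct_eq primes K.toNat i (by omega)
    rw [List.range'_succ, List.map_cons]
    simp only [pvBGo, pvAGo, hcur, hPA]
    by_cases hPN : (pvWin primes K.toNat i).prod ≤ N
    · rw [if_pos hPN, if_pos hPN]
      have hbest : (if best < (pvWin primes K.toNat i).prod then (pvWin primes K.toNat i).prod else best)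
          = max best (pvWin primes K.toNat i).prod := by split <;> omega
      have hP2 : (if primes.getD (i + K.toNat) 0 = 0 then
            (if primes.getD i 0 = 0 then pvMp (pvWin primes K.toNat i)
              else PySem.Int.floordiv (pvMp (pvWin primes K.toNat i)) (primes.getD i 0))
          else
            (if primes.getD i 0 = 0 then pvMp (pvWin primes K.toNat i)
              else PySem.Int.floordiv (pvMp (pvWin primes K.toNat i)) (primes.getD i 0)) *
              primes.getD (i + K.toNat) 0)
          = pvMp (pvWin primes K.toNat (i + 1)) := by
        have hp1 : (if primes.getD i 0 = 0 then pvMp (pvWin primes K.toNat i)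
            else PySem.Int.floordiv (pvMp (pvWin primes K.toNat i)) (primes.getD i 0))
            = pvMp (List.take (K.toNat - 1) (List.drop (i + 1) primes)) := by
          by_cases ho : primes.getD i 0 = 0
          · rw [if_pos ho, hwc, ho]; simp [pvMp, pvF]
          · rw [if_neg ho, hwc]
            simp only [pvMp, List.map_cons, List.prod_cons, pvF, if_neg ho, PySem.Int.floordiv]
            exact Int.mul_fdiv_cancel_left _ ho
        rw [hp1, hws]
        by_cases hi2 : primes.getD (i + K.toNat) 0 = 0
        · rw [if_pos hi2, hi2]; simp [pvMp, pvF]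
        · rw [if_neg hi2]
          simp only [pvMp, List.map_append, List.prod_append, List.map_cons, List.map_nil,
            List.prod_cons, List.prod_nil, pvF, if_neg hi2]
          ring
      have hZ2 : (if primes.getD (i + K.toNat) 0 = 0 then
            (if primes.getD i 0 = 0 then ((pvCz (pvWin primes K.toNat i) : Int)) - 1
              else ((pvCz (pvWin primes K.toNat i) : Int))) + 1
          else if primes.getD i 0 = 0 then ((pvCz (pvWin primes K.toNat i) : Int)) - 1
            else ((pvCz (pvWin primes K.toNat i) : Int)))
          = ((pvCz (pvWin primes K.toNat (i + 1)) : Int)) := by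
        rw [hwc, hws]
        simp only [pvCz, List.count_cons, List.count_append, List.count_nil]
        push_cast
        simp only [beq_iff_eq]
        split_ifs <;> omega
      rw [hP2, hZ2, hbest]
      exact ih (i + 1) _ (by omega)
    · rw [if_neg hPN, if_neg hPN]

theorem find_largest_product_spec_aux (N K : Int) (primes : List Int) :
    find_largest_product N K primes = find_largest_product_alt N K primes := by
  unfold find_largest_product find_largest_product_alt
  by_cases hK : K ≤ 0
  · rw [if_pos hK]
    have hm : (0 : Int) < (primes.length : Int) - K + 1 := by
      have : (0 : Int) ≤ (primes.length : Int) := by positivity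
      omega
    rw [PySem.List.pyRange_one_cons hm]
    have hprod1 : ∀ i : Int, pvAProduct primes K i = 1 := by
      intro i; unfold pvAProduct
      rw [PySem.List.pyRange_one_eq_nil hK]
      rfl
    by_cases hN : (1 : Int) ≤ N
    · rw [if_pos hN]
      have hgo : ∀ L, pvAGo N K primes L 1 = 1 := by
        intro L; induction L with
        | nil => rfl
        | cons a L ih =>
          simp only [pvAGo, hprod1]
          rw [if_pos hN]
          simpa using ih
      simp only [pvAGo, hprod1]
      rw [if_pos hN]
      have hmax : max (-1 : Int) 1 = 1 := by decide
      rw [hmax]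
      exact hgo _
    · rw [if_neg hN]
      simp only [pvAGo, hprod1]
      rw [if_neg hN]
  · rw [if_neg hK]
    have hK' : 0 < K := by omega
    by_cases hlen : (primes.length : Int) < K
    · rw [if_pos hlen]
      rw [PySem.List.pyRange_one_eq_nil (by omega)]
      rfl
    · rw [if_neg hlen]
      have hkle : K.toNat ≤ primes.length := by omega
      have hinit : pvBInit (primes.take K.toNat)
          = (pvMp (pvWin primes K.toNat 0), ((pvCz (pvWin primes K.toNat 0) : Int))) := by
        unfold pvBInit
        rw [pvBInit_spec]
        simp [pvWin]
      have hrange : PySem.List.pyRange 0 ((primes.length : Int) - K + 1) 1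
          = (List.range' 0 ((primes.length - K.toNat) + 1)).map (fun n : Nat => (n : Int)) := by
        have hc : (primes.length : Int) - K + 1 = ((primes.length - K.toNat + 1 : Nat) : Int) := by omega
        rw [hc, PySem.List.pyRange_zero_natCast, List.range_eq_range']
      rw [hrange, hinit]
      exact (pvBGo_eq N K primes hK' (primes.length - K.toNat) 0 (-1) (by omega)).symm

-- ===== VERDICT (by name: the statement is the Claim_ definition above) =====
theorem find_largest_product_spec : Claim_equal_find_largest_product := by
  intro N K primes _
  exact find_largest_product_spec_aux N K primes
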